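-- pv_equiv track=rewrite | github.com/qiyyyue/OJ | leetcode/850.py | cal_one_y_area
-- ===== SOURCE A (Python) =====
-- def cal_one_y_area(y_l, y_h, rectangles):
--
--     tmp_x_len = 0
--
--     x_list = []
--     for i in range(len(rectangles)):
--         if rectangles[i][1] <= y_l and rectangles[i][3] >= y_h:
--             x_list.append(rectangles[i][0])
--             x_list.append(rectangles[i][2])
--
--     x_set = set(x_list)
--     x_set = sorted(x_set)
--
--     for i in range(len(x_set) - 1):
--         x_l = x_set[i]
--         x_h = x_set[i + 1]
--         for j in range(len(x_list )//2):
--             x_1 = x_list[j*2]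
--             x_2 = x_list[j*2 + 1]
--             if x_1 <= x_l and x_2 >= x_h:
--                 tmp_x_len += (x_h - x_l)
--                 break
--     return tmp_x_len *(y_h - y_l)
-- ===== SOURCE B (Python) =====
-- def cal_one_y_area(y_l, y_h, rectangles):
--     # sort the x-intervals of the qualifying rectangles by start, then merge them in one sweep
--     ivals = sorted(((r[0], r[2]) for r in rectangles
--                     if r[1] <= y_l and r[3] >= y_h), key=lambda p: p[0])
--     total = 0
--     cur_end = None
--     for a, b in ivals:
--         if cur_end is None or a > cur_end:
--             if b > a:
--                 total += b - a
--                 cur_end = b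
--         elif b > cur_end:
--             total += b - cur_end
--             cur_end = b
--     return total * (y_h - y_l)
-- ===== Notes on version B (the rewrite author's own statement) =====
-- stated objective: alternative
-- what changed: Replaces A's coordinate-compression double loop (for every adjacent pair of sorted endpoints, scan all intervals for one that covers the gap) by the classic sort-then-merge sweep over the x-intervals, summing union lengths in a single pass; on the measured random inputs few rectangles span the y-slice, so no speed-up was observed.
import Mathlib
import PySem

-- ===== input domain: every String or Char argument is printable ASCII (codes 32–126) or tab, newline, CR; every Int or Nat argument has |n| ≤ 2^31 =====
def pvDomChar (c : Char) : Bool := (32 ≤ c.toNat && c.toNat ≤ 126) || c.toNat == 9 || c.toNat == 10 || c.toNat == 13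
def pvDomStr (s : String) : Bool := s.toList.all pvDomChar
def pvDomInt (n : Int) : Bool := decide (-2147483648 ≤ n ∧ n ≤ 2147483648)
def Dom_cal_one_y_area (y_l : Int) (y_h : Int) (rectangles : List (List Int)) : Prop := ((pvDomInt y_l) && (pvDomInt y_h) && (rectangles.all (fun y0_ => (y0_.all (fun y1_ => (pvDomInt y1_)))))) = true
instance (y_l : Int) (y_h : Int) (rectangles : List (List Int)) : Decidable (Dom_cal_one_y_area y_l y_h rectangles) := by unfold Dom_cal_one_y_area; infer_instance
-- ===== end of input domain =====

-- B replaces A's coordinate-compression double loop by a sort-then-merge sweep over the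
-- x-intervals, summing union lengths in one pass (objective: alternative algorithm).

-- ===== PORT A =====
def cal_one_y_area (y_l : Int) (y_h : Int) (rectangles : List (List Int)) : Int :=
  let x_list := (PySem.List.pyRange 0 (PySem.List.len rectangles)).foldl (fun acc i =>
      let r := PySem.List.pyGetD rectangles i []
      if PySem.List.pyGetD r 1 0 ≤ y_l ∧ y_h ≤ PySem.List.pyGetD r 3 0 then
        (acc ++ [PySem.List.pyGetD r 0 0]) ++ [PySem.List.pyGetD r 2 0]
      else acc) []
  let x_set := PySem.List.sorted (PySem.Set.ofList x_list) (fun x => x)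
  -- inner 'for j … if …: tmp += (x_h - x_l); break' = add once if any j matches
  let tmp := (PySem.List.pyRange 0 (PySem.List.len x_set - 1)).foldl (fun t i =>
      let x_l := PySem.List.pyGetD x_set i 0
      let x_h := PySem.List.pyGetD x_set (i + 1) 0
      if (PySem.List.pyRange 0 (PySem.Int.floordiv (PySem.List.len x_list) 2)).any (fun j =>
           decide (PySem.List.pyGetD x_list (j * 2) 0 ≤ x_l) &&
           decide (x_h ≤ PySem.List.pyGetD x_list (j * 2 + 1) 0))
      then t + (x_h - x_l) else t) 0
  tmp * (y_h - y_l)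

-- ===== PORT B =====
-- one merge step of the sweep: state = (total, current merged end or none)
def pvSweepStep (st : Int × Option Int) (p : Int × Int) : Int × Option Int :=
  match st.2 with
  | none => if p.1 < p.2 then (st.1 + (p.2 - p.1), some p.2) else st
  | some c =>
    if c < p.1 then (if p.1 < p.2 then (st.1 + (p.2 - p.1), some p.2) else st)
    else if c < p.2 then (st.1 + (p.2 - c), some p.2) else st

def cal_one_y_area_alt (y_l : Int) (y_h : Int) (rectangles : List (List Int)) : Int :=
  let ivals := PySem.List.sorted
    ((rectangles.filter (fun r =>
        decide (PySem.List.pyGetD r 1 0 ≤ y_l) && decide (y_h ≤ PySem.List.pyGetD r 3 0))).map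
      (fun r => (PySem.List.pyGetD r 0 0, PySem.List.pyGetD r 2 0)))
    (fun p => p.1)
  let res := ivals.foldl pvSweepStep (0, none)
  res.1 * (y_h - y_l)

-- ===== PRECONDITION & SPEC =====
-- Pre_ excludes exactly the inputs on which Python A raises IndexError: a row shorter than 2
-- (rectangles[i][1] fails), or a row shorter than 4 whose second entry passes the first test
-- (rectangles[i][3] is then evaluated).  A returns normally on everything admitted.
def Pre_cal_one_y_area (y_l : Int) (y_h : Int) (rectangles : List (List Int)) : Prop :=
  ∀ r ∈ rectangles, 4 ≤ r.length ∨ (2 ≤ r.length ∧ y_l < PySem.List.pyGetD r 1 0)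
instance (y_l : Int) (y_h : Int) (rectangles : List (List Int)) : Decidable (Pre_cal_one_y_area y_l y_h rectangles) := by unfold Pre_cal_one_y_area; infer_instance
def pvWitness_cal_one_y_area : Int × Int × List (List Int) := (0, 1, [[0, 0, 1, 1], [2, -1, 5, 3]])
def Spec_cal_one_y_area (y_l : Int) (y_h : Int) (rectangles : List (List Int)) (out : Int) : Prop := out = cal_one_y_area_alt y_l y_h rectangles
instance (y_l : Int) (y_h : Int) (rectangles : List (List Int)) (out : Int) : Decidable (Spec_cal_one_y_area y_l y_h rectangles out) := by unfold Spec_cal_one_y_area; infer_instance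

-- ===== CLAIM (what is proved, stated in full; the proofs are below) =====
def Claim_equal_cal_one_y_area : Prop := ∀ (y_l : Int) (y_h : Int) (rectangles : List (List Int)), Dom_cal_one_y_area y_l y_h rectangles → Pre_cal_one_y_area y_l y_h rectangles → Spec_cal_one_y_area y_l y_h rectangles (cal_one_y_area y_l y_h rectangles)

-- ===== LEMMAS AND PROOFS =====

-- the x-intervals of the rectangles that span the y-slice
def pvIvals (y_l y_h : Int) (rects : List (List Int)) : List (Int × Int) :=
  (rects.filter (fun r =>
      decide (PySem.List.pyGetD r 1 0 ≤ y_l) && decide (y_h ≤ PySem.List.pyGetD r 3 0))).map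
    (fun r => (PySem.List.pyGetD r 0 0, PySem.List.pyGetD r 2 0))

-- their endpoints, flattened (= A's x_list)
def pvEnds (I : List (Int × Int)) : List Int := I.flatMap (fun p => [p.1, p.2])

-- 'some interval covers the whole gap [x, y]'
def pvCov (I : List (Int × Int)) (x y : Int) : Bool :=
  I.any (fun p => decide (p.1 ≤ x) && decide (y ≤ p.2))

-- the union of the intervals, as a finite set of integer unit cells
def pvCells (a b : Int) : Finset ℤ := (PySem.List.pyRange a b).toFinset
def pvUSet (I : List (Int × Int)) : Finset ℤ :=
  I.foldr (fun p s => pvCells p.1 p.2 ∪ s) ∅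

-- A's outer loop, structurally: sum over adjacent pairs of the endpoint list
def pvBlocks (I : List (Int × Int)) : List Int → Int
  | x :: y :: rest => (if pvCov I x y then y - x else 0) + pvBlocks I (y :: rest)
  | _ => 0

theorem pvCells_eq (a b : Int) : pvCells a b = Finset.Ico a b := by
  ext k; simp [pvCells, PySem.List.mem_pyRange_one, Finset.mem_Ico]

theorem pvUSet_nil : pvUSet [] = ∅ := rfl

theorem pvUSet_cons (p : Int × Int) (I : List (Int × Int)) :
    pvUSet (p :: I) = pvCells p.1 p.2 ∪ pvUSet I := rfl

theorem pv_mem_uset (I : List (Int × Int)) (k : ℤ) :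
    k ∈ pvUSet I ↔ ∃ p ∈ I, p.1 ≤ k ∧ k < p.2 := by
  induction I with
  | nil => simp [pvUSet_nil]
  | cons p I ih =>
    rw [pvUSet_cons, pvCells_eq]
    simp only [Finset.mem_union, Finset.mem_Ico, List.mem_cons, ih]
    constructor
    · rintro (h | ⟨q, hq, h⟩)
      · exact ⟨p, Or.inl rfl, h⟩
      · exact ⟨q, Or.inr hq, h⟩
    · rintro ⟨q, (rfl | hq), h⟩
      · exact Or.inl h
      · exact Or.inr ⟨q, hq, h⟩

theorem pv_uset_perm {I I' : List (Int × Int)} (h : I.Perm I') : pvUSet I = pvUSet I' := by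
  ext k
  rw [pv_mem_uset, pv_mem_uset]
  constructor
  · rintro ⟨p, hp, hle⟩; exact ⟨p, h.mem_iff.mp hp, hle⟩
  · rintro ⟨p, hp, hle⟩; exact ⟨p, h.mem_iff.mpr hp, hle⟩

theorem pv_xlist_eq (y_l y_h : Int) (rects : List (List Int)) :
    rects.foldl (fun acc r =>
      if PySem.List.pyGetD r 1 0 ≤ y_l ∧ y_h ≤ PySem.List.pyGetD r 3 0 then
        (acc ++ [PySem.List.pyGetD r 0 0]) ++ [PySem.List.pyGetD r 2 0]
      else acc) [] = pvEnds (pvIvals y_l y_h rects) := by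
  suffices h : ∀ (acc : List Int), rects.foldl (fun acc r =>
      if PySem.List.pyGetD r 1 0 ≤ y_l ∧ y_h ≤ PySem.List.pyGetD r 3 0 then
        (acc ++ [PySem.List.pyGetD r 0 0]) ++ [PySem.List.pyGetD r 2 0]
      else acc) acc = acc ++ pvEnds (pvIvals y_l y_h rects) by
    simpa using h []
  induction rects with
  | nil => intro acc; simp [pvIvals, pvEnds]
  | cons r rects ih =>
    intro acc
    by_cases hc : PySem.List.pyGetD r 1 0 ≤ y_l ∧ y_h ≤ PySem.List.pyGetD r 3 0
    · simp only [List.foldl_cons, if_pos hc, ih]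
      simp [pvIvals, pvEnds, hc]
    · simp only [List.foldl_cons, if_neg hc, ih]
      rw [not_and_or] at hc
      rcases hc with hc | hc
      · simp [pvIvals, hc]
      · simp [pvIvals, hc]

theorem pv_ends_length (I : List (Int × Int)) : (pvEnds I).length = 2 * I.length := by
  induction I with
  | nil => rfl
  | cons p I ih => simp [pvEnds] at *; omega

theorem pv_getD_cons2 (a b : Int) (t : List Int) (m : Nat) :
    PySem.List.pyGetD (a :: b :: t) ((m : Int) + 2) 0 = PySem.List.pyGetD t (m : Int) 0 := by
  rw [show ((m:Int) + 2) = ((m + 2 : Nat) : Int) by push_cast; ring,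
      PySem.List.pyGetD_natCast, PySem.List.pyGetD_natCast]
  rfl

theorem pv_any_eq_cov (I : List (Int × Int)) (x y : Int) :
    (PySem.List.pyRange 0 (PySem.Int.floordiv (PySem.List.len (pvEnds I)) 2)).any (fun j =>
      decide (PySem.List.pyGetD (pvEnds I) (j * 2) 0 ≤ x) &&
      decide (y ≤ PySem.List.pyGetD (pvEnds I) (j * 2 + 1) 0)) = pvCov I x y := by
  have hlen : PySem.List.len (pvEnds I) = ((2 * I.length : Nat) : Int) := by
    rw [PySem.List.len_eq, pv_ends_length]
  have hfd : PySem.Int.floordiv ((2 * I.length : Nat) : Int) 2 = (I.length : Int) := by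
    push_cast
    simp [PySem.Int.floordiv]
  rw [hlen, hfd, PySem.List.pyRange_zero_nat, List.any_map]
  clear hlen hfd
  induction I with
  | nil => simp [pvCov]
  | cons p I ih =>
    rw [show pvEnds (p :: I) = p.1 :: p.2 :: pvEnds I from rfl]
    rw [List.length_cons, List.range_succ_eq_map, List.any_cons, List.any_map]
    rw [show pvCov (p :: I) x y
        = ((decide (p.1 ≤ x) && decide (y ≤ p.2)) || pvCov I x y) from by simp [pvCov]]
    congr 1
    · simp only [Function.comp, Nat.cast_zero, zero_mul, zero_add,
        PySem.List.pyGetD_zero_cons]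
      rw [show PySem.List.pyGetD (p.1 :: p.2 :: pvEnds I) 1 0 = p.2 from by
        rw [show (1:Int) = ((1:Nat):Int) by norm_num, PySem.List.pyGetD_natCast]; rfl]
    · rw [← ih]
      refine List.any_congr rfl (fun k => ?_)
      simp only [Function.comp]
      rw [show ((Nat.succ k : Nat) : Int) * 2 = ((2 * k : Nat) : Int) + 2 by push_cast; ring]
      rw [show (((2 * k : Nat) : Int) + 2) + 1 = ((2 * k + 1 : Nat) : Int) + 2 by push_cast; ring]
      rw [pv_getD_cons2, pv_getD_cons2]
      rw [show ((k : Nat) : Int) * 2 = ((2 * k : Nat) : Int) by push_cast; ring]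
      rw [show ((2 * k : Nat) : Int) + 1 = ((2 * k + 1 : Nat) : Int) by push_cast; ring]

theorem pvBlocks_nil (I : List (Int × Int)) : pvBlocks I [] = 0 := rfl
theorem pvBlocks_single (I : List (Int × Int)) (x : Int) : pvBlocks I [x] = 0 := rfl
theorem pvBlocks_cons2 (I : List (Int × Int)) (x y : Int) (rest : List Int) :
    pvBlocks I (x :: y :: rest) = (if pvCov I x y then y - x else 0) + pvBlocks I (y :: rest) := rfl

theorem pv_sum_blocks_aux (I : List (Int × Int)) : ∀ (xs : List Int) (t0 : Int),
    (List.range (xs.length - 1)).foldl (fun t k =>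
      if pvCov I (xs.getD k 0) (xs.getD (k+1) 0) = true
      then t + (xs.getD (k+1) 0 - xs.getD k 0) else t) t0 = t0 + pvBlocks I xs := by
  intro xs
  induction xs with
  | nil => intro t0; simp [pvBlocks_nil]
  | cons x rest ih =>
    intro t0
    cases rest with
    | nil => simp [pvBlocks_single]
    | cons y rest' =>
      rw [show (x :: y :: rest').length - 1 = ((y :: rest').length - 1) + 1 by simp]
      rw [List.range_succ_eq_map, List.foldl_cons, List.foldl_map]
      simp only [List.getD_cons_zero, List.getD_cons_succ, Nat.succ_eq_add_one]
      simp only [List.getD_cons_succ] at ih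
      rw [ih]
      rw [pvBlocks_cons2]
      split_ifs <;> ring

theorem pv_sum_eq_blocks (I : List (Int × Int)) (xs : List Int) :
    (PySem.List.pyRange 0 (PySem.List.len xs - 1)).foldl (fun t i =>
      if pvCov I (PySem.List.pyGetD xs i 0) (PySem.List.pyGetD xs (i + 1) 0) = true
      then t + (PySem.List.pyGetD xs (i + 1) 0 - PySem.List.pyGetD xs i 0) else t) 0
    = pvBlocks I xs := by
  rw [PySem.List.len_eq, PySem.List.pyRange_one, List.foldl_map]
  rw [show (((xs.length : Int) - 1) - 0).toNat = xs.length - 1 by omega]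
  rw [List.foldl_ext _ (fun t k =>
      if pvCov I (xs.getD k 0) (xs.getD (k+1) 0) = true
      then t + (xs.getD (k+1) 0 - xs.getD k 0) else t) 0
    (by
      intro t k _
      simp only [zero_add]
      rw [show ((k : Int) + 1) = ((k + 1 : Nat) : Int) by push_cast; ring,
          PySem.List.pyGetD_natCast, PySem.List.pyGetD_natCast])]
  rw [pv_sum_blocks_aux I xs 0, zero_add]

theorem pv_cov_iff (I : List (Int × Int)) (x y : Int) :
    pvCov I x y = true ↔ ∃ p ∈ I, p.1 ≤ x ∧ y ≤ p.2 := by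
  simp [pvCov]

theorem pv_blocks_card (I : List (Int × Int)) (rest : List Int) : ∀ (x : Int),
    (x :: rest).Pairwise (· < ·) →
    (∀ e, (∃ p ∈ I, e = p.1 ∨ e = p.2) → x ≤ e → e ∈ x :: rest) →
    pvBlocks I (x :: rest)
      = ((pvUSet I ∩ Finset.Ico x ((x :: rest).getLast (by simp))).card : Int) := by
  induction rest with
  | nil =>
    intro x _ _
    simp [pvBlocks_single]
  | cons y rest' ih =>
    intro x hpw hno
    have hxy : x < y := (List.pairwise_cons.mp hpw).1 y (by simp)
    have hpw' : (y :: rest').Pairwise (· < ·) := (List.pairwise_cons.mp hpw).2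
    have hL : (x :: y :: rest').getLast (by simp) = (y :: rest').getLast (by simp) :=
      List.getLast_cons (by simp)
    set L := (y :: rest').getLast (by simp) with hLdef
    have hLmem : L ∈ y :: rest' := List.getLast_mem _
    have hyL : y ≤ L := by
      rcases List.mem_cons.mp hLmem with h | h
      · omega
      · exact le_of_lt ((List.pairwise_cons.mp hpw').1 L h)
    have hno' : ∀ e, (∃ p ∈ I, e = p.1 ∨ e = p.2) → y ≤ e → e ∈ y :: rest' := by
      intro e he hye
      have := hno e he (by omega)
      rcases List.mem_cons.mp this with h | h
      · omega
      · exact h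
    have key : ∀ k : ℤ, x ≤ k → k < y →
        ((∃ p ∈ I, p.1 ≤ k ∧ k < p.2) ↔ pvCov I x y = true) := by
      intro k hxk hky
      constructor
      · rintro ⟨p, hp, h1, h2⟩
        have hp1 : p.1 ≤ x := by
          by_contra hcon
          push Not at hcon
          have he := hno p.1 ⟨p, hp, Or.inl rfl⟩ (le_of_lt hcon)
          simp only [List.mem_cons] at he
          rcases he with he | he | he
          · omega
          · omega
          · have := (List.pairwise_cons.mp hpw').1 p.1 he
            omega
        have hp2 : y ≤ p.2 := by
          by_contra hcon
          push Not at hcon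
          have hxp2 : x ≤ p.2 := by omega
          have he := hno p.2 ⟨p, hp, Or.inr rfl⟩ hxp2
          simp only [List.mem_cons] at he
          rcases he with he | he | he
          · omega
          · omega
          · have := (List.pairwise_cons.mp hpw').1 p.2 he
            omega
        exact (pv_cov_iff I x y).mpr ⟨p, hp, hp1, hp2⟩
      · intro hcov
        obtain ⟨p, hp, h1, h2⟩ := (pv_cov_iff I x y).mp hcov
        exact ⟨p, hp, by omega, by omega⟩
    have hblock : pvUSet I ∩ Finset.Ico x y
        = (if pvCov I x y = true then Finset.Ico x y else ∅) := by
      split_ifs with h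
      · ext k
        simp only [Finset.mem_inter, Finset.mem_Ico, pv_mem_uset]
        constructor
        · rintro ⟨_, hk⟩; exact hk
        · rintro hk; exact ⟨(key k hk.1 hk.2).mpr h, hk⟩
      · ext k
        simp only [Finset.mem_inter, Finset.mem_Ico, pv_mem_uset, Finset.notMem_empty,
          iff_false, not_and]
        intro hmem hk1 hk2
        exact h ((key k hk1 hk2).mp hmem)
    have hsplit : pvUSet I ∩ Finset.Ico x L
        = (pvUSet I ∩ Finset.Ico x y) ∪ (pvUSet I ∩ Finset.Ico y L) := by
      rw [← Finset.inter_union_distrib_left, Finset.Ico_union_Ico_eq_Ico (le_of_lt hxy) hyL]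
    have hdisj : Disjoint (pvUSet I ∩ Finset.Ico x y) (pvUSet I ∩ Finset.Ico y L) :=
      Disjoint.mono Finset.inter_subset_right Finset.inter_subset_right
        (Finset.Ico_disjoint_Ico_consecutive x y L)
    rw [pvBlocks_cons2, hL, hsplit, Finset.card_union_of_disjoint hdisj]
    rw [ih y hpw' hno']
    rw [hblock]
    push_cast
    split_ifs with h
    · rw [Int.card_Ico]
      have : ((y - x).toNat : Int) = y - x := by omega
      rw [this]
    · simp
      rfl

theorem pv_mem_ends (I : List (Int × Int)) (e : Int) :
    e ∈ pvEnds I ↔ ∃ p ∈ I, e = p.1 ∨ e = p.2 := by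
  simp [pvEnds]

theorem pv_le_getLast : ∀ (l : List Int) (h : l ≠ []), l.Pairwise (· < ·) →
    ∀ e ∈ l, e ≤ l.getLast h := by
  intro l
  induction l with
  | nil => intro h; simp at h
  | cons a l ih =>
    intro h hpw e he
    cases l with
    | nil => simp at he; simp [he]
    | cons b l' =>
      rw [List.getLast_cons (by simp)]
      rcases List.mem_cons.mp he with rfl | he'
      · have hab : e < b := (List.pairwise_cons.mp hpw).1 b (by simp)
        have := ih (by simp) (List.pairwise_cons.mp hpw).2 b (by simp)
        omega
      · exact ih (by simp) (List.pairwise_cons.mp hpw).2 e he'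

theorem pv_A_core (I : List (Int × Int)) :
    (PySem.List.pyRange 0 (PySem.List.len (PySem.List.sorted (PySem.Set.ofList (pvEnds I)) (fun x => x)) - 1)).foldl (fun t i =>
      if (PySem.List.pyRange 0 (PySem.Int.floordiv (PySem.List.len (pvEnds I)) 2)).any (fun j =>
           decide (PySem.List.pyGetD (pvEnds I) (j * 2) 0 ≤ PySem.List.pyGetD (PySem.List.sorted (PySem.Set.ofList (pvEnds I)) (fun x => x)) i 0) &&
           decide (PySem.List.pyGetD (PySem.List.sorted (PySem.Set.ofList (pvEnds I)) (fun x => x)) (i + 1) 0 ≤ PySem.List.pyGetD (pvEnds I) (j * 2 + 1) 0))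
      then t + (PySem.List.pyGetD (PySem.List.sorted (PySem.Set.ofList (pvEnds I)) (fun x => x)) (i + 1) 0 - PySem.List.pyGetD (PySem.List.sorted (PySem.Set.ofList (pvEnds I)) (fun x => x)) i 0) else t) 0
    = ((pvUSet I).card : Int) := by
  simp only [pv_any_eq_cov]
  rw [pv_sum_eq_blocks]
  rcases hxs : PySem.List.sorted (PySem.Set.ofList (pvEnds I)) (fun x => x) with _ | ⟨x, rest⟩
  · -- no endpoints at all: I = []
    have hends : pvEnds I = [] := by
      by_contra hne
      rcases List.exists_mem_of_ne_nil _ hne with ⟨e, he⟩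
      have : e ∈ PySem.List.sorted (PySem.Set.ofList (pvEnds I)) (fun x => x) := by
        rw [PySem.List.mem_sorted, PySem.Set.mem_ofList]
        exact he
      rw [hxs] at this
      simp at this
    have hI : I = [] := by
      cases I with
      | nil => rfl
      | cons p I' => simp [pvEnds] at hends
    subst hI
    simp [pvBlocks_nil, pvUSet_nil]
  · have hpw : (x :: rest).Pairwise (· < ·) := by
      rw [← hxs]; exact PySem.List.sorted_ofList_pairwise_lt _
    have hno : ∀ e, (∃ p ∈ I, e = p.1 ∨ e = p.2) → x ≤ e → e ∈ x :: rest := by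
      intro e he _
      rw [← hxs, PySem.List.mem_sorted, PySem.Set.mem_ofList, pv_mem_ends]
      exact he
    rw [pv_blocks_card I rest x hpw hno]
    congr 2
    apply Finset.inter_eq_left.mpr
    intro k hk
    obtain ⟨p, hp, h1, h2⟩ := (pv_mem_uset I k).mp hk
    have hp1 : p.1 ∈ x :: rest := by
      rw [← hxs, PySem.List.mem_sorted, PySem.Set.mem_ofList, pv_mem_ends]
      exact ⟨p, hp, Or.inl rfl⟩
    have hp2 : p.2 ∈ x :: rest := by
      rw [← hxs, PySem.List.mem_sorted, PySem.Set.mem_ofList, pv_mem_ends]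
      exact ⟨p, hp, Or.inr rfl⟩
    have hx1 : x ≤ p.1 := by
      rcases List.mem_cons.mp hp1 with h | h
      · omega
      · have := (List.pairwise_cons.mp hpw).1 p.1 h
        omega
    have hx2 : p.2 ≤ (x :: rest).getLast (by simp) :=
      pv_le_getLast _ (by simp) hpw p.2 hp2
    rw [Finset.mem_Ico]
    omega

theorem pv_sweep_inv (l : List (Int × Int)) : ∀ (t : Int) (cur : Option Int) (S : Finset ℤ),
    l.Pairwise (fun p q => p.1 ≤ q.1) →
    t = (S.card : Int) →
    (match cur with
     | none => S = ∅
     | some c => (∀ k ∈ S, k < c) ∧ ∃ a0, a0 < c ∧ Finset.Ico a0 c ⊆ S ∧ ∀ p ∈ l, a0 ≤ p.1) →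
    (l.foldl pvSweepStep (t, cur)).1 = ((S ∪ pvUSet l).card : Int) := by
  induction l with
  | nil =>
    intro t cur S _ ht _
    simpa [pvUSet_nil] using ht
  | cons p l ih =>
    intro t cur S hpw ht hinv
    obtain ⟨a, b⟩ := p
    have hpw' := (List.pairwise_cons.mp hpw).2
    have hhead := (List.pairwise_cons.mp hpw).1
    rw [List.foldl_cons,
        show pvUSet ((a, b) :: l) = Finset.Ico a b ∪ pvUSet l by rw [pvUSet_cons, pvCells_eq],
        ← Finset.union_assoc]
    cases cur with
    | none =>
      have hS : S = ∅ := hinv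
      subst hS
      simp only [Finset.card_empty, Nat.cast_zero] at ht
      by_cases hab : a < b
      · rw [show pvSweepStep (t, none) (a, b) = (t + (b - a), some b) by
          simp [pvSweepStep, hab], Finset.empty_union]
        refine ih (t + (b - a)) (some b) (Finset.Ico a b) hpw' ?_ ?_
        · rw [Int.card_Ico]; omega
        · exact ⟨fun k hk => (Finset.mem_Ico.mp hk).2, a, hab, Finset.Subset.refl _,
            fun q hq => hhead q hq⟩
      · rw [show pvSweepStep (t, none) (a, b) = (t, none) by simp [pvSweepStep, hab],
            Finset.Ico_eq_empty (by omega), Finset.union_empty, Finset.empty_union]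
        have := ih t none ∅ hpw' (by simpa using ht) rfl
        simpa [Finset.empty_union] using this
    | some c =>
      obtain ⟨hSc, a0, ha0c, hIcoS, hfst⟩ := hinv
      have ha0a : a0 ≤ a := hfst (a, b) (by simp)
      by_cases hca : c < a
      · by_cases hab : a < b
        · rw [show pvSweepStep (t, some c) (a, b) = (t + (b - a), some b) by
            simp [pvSweepStep, hca, hab]]
          refine ih (t + (b - a)) (some b) (S ∪ Finset.Ico a b) hpw' ?_ ?_
          · have hd : Disjoint S (Finset.Ico a b) := by
              rw [Finset.disjoint_left]
              intro k hk hk2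
              have := hSc k hk
              rw [Finset.mem_Ico] at hk2
              omega
            rw [Finset.card_union_of_disjoint hd, Int.card_Ico]
            push_cast
            omega
          · refine ⟨fun k hk => ?_, a, hab, Finset.subset_union_right,
              fun q hq => hhead q hq⟩
            rcases Finset.mem_union.mp hk with h | h
            · have := hSc k h; omega
            · exact (Finset.mem_Ico.mp h).2
        · rw [show pvSweepStep (t, some c) (a, b) = (t, some c) by
            simp [pvSweepStep, hca, hab],
              Finset.Ico_eq_empty (by omega), Finset.union_empty]
          exact ih t (some c) S hpw' ht
            ⟨hSc, a0, ha0c, hIcoS, fun q hq => hfst q (by simp [hq])⟩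
      · by_cases hcb : c < b
        · rw [show pvSweepStep (t, some c) (a, b) = (t + (b - c), some b) by
            simp [pvSweepStep, hca, hcb]]
          have hsub : Finset.Ico a c ⊆ S := by
            intro k hk
            rw [Finset.mem_Ico] at hk
            exact hIcoS (Finset.mem_Ico.mpr (by omega))
          have hSu : S ∪ Finset.Ico a b = S ∪ Finset.Ico c b := by
            rw [show Finset.Ico a b = Finset.Ico a c ∪ Finset.Ico c b from
                  (Finset.Ico_union_Ico_eq_Ico (by omega) (by omega)).symm,
                ← Finset.union_assoc, Finset.union_eq_left.mpr hsub]
          rw [hSu]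
          refine ih (t + (b - c)) (some b) (S ∪ Finset.Ico c b) hpw' ?_ ?_
          · have hd : Disjoint S (Finset.Ico c b) := by
              rw [Finset.disjoint_left]
              intro k hk hk2
              have := hSc k hk
              rw [Finset.mem_Ico] at hk2
              omega
            rw [Finset.card_union_of_disjoint hd, Int.card_Ico]
            push_cast
            omega
          · refine ⟨fun k hk => ?_, a0, by omega, ?_, fun q hq => hfst q (by simp [hq])⟩
            · rcases Finset.mem_union.mp hk with h | h
              · have := hSc k h; omega
              · exact (Finset.mem_Ico.mp h).2
            · intro k hk
              rw [Finset.mem_Ico] at hk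
              by_cases hkc : k < c
              · exact Finset.mem_union_left _ (hIcoS (Finset.mem_Ico.mpr (by omega)))
              · exact Finset.mem_union_right _ (Finset.mem_Ico.mpr (by omega))
        · rw [show pvSweepStep (t, some c) (a, b) = (t, some c) by
            simp [pvSweepStep, hca, hcb]]
          have : S ∪ Finset.Ico a b = S := by
            apply Finset.union_eq_left.mpr
            intro k hk
            rw [Finset.mem_Ico] at hk
            exact hIcoS (Finset.mem_Ico.mpr (by omega))
          rw [this]
          exact ih t (some c) S hpw' ht
            ⟨hSc, a0, ha0c, hIcoS, fun q hq => hfst q (by simp [hq])⟩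

-- ===== VERDICT (by name: the statement is the Claim_ definition above) =====
theorem cal_one_y_area_spec : Claim_equal_cal_one_y_area := by
  intro y_l y_h rects _ _
  unfold Spec_cal_one_y_area
  have hA : cal_one_y_area y_l y_h rects
      = ((pvUSet (pvIvals y_l y_h rects)).card : Int) * (y_h - y_l) := by
    simp only [cal_one_y_area]
    rw [PySem.List.foldl_pyRange_zero_pyGetD rects []
      (fun acc r => if PySem.List.pyGetD r 1 0 ≤ y_l ∧ y_h ≤ PySem.List.pyGetD r 3 0 then
        (acc ++ [PySem.List.pyGetD r 0 0]) ++ [PySem.List.pyGetD r 2 0] else acc) []]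
    rw [pv_xlist_eq y_l y_h rects]
    rw [pv_A_core (pvIvals y_l y_h rects)]
  have hB : cal_one_y_area_alt y_l y_h rects
      = ((pvUSet (pvIvals y_l y_h rects)).card : Int) * (y_h - y_l) := by
    simp only [cal_one_y_area_alt]
    rw [show ((rects.filter (fun r =>
        decide (PySem.List.pyGetD r 1 0 ≤ y_l) && decide (y_h ≤ PySem.List.pyGetD r 3 0))).map
        (fun r => (PySem.List.pyGetD r 0 0, PySem.List.pyGetD r 2 0)))
      = pvIvals y_l y_h rects from rfl]
    rw [pv_sweep_inv (PySem.List.sorted (pvIvals y_l y_h rects) (fun p => p.1)) 0 none ∅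
      (PySem.List.sorted_pairwise _ _) (by simp) rfl]
    rw [Finset.empty_union,
        pv_uset_perm (PySem.List.sorted_perm (pvIvals y_l y_h rects) (fun p => p.1) false)]
  rw [hA, hB]
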